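-- pv_equiv track=rewrite | github.com/Yaco-Lee/Python | Calculator/src/googleFoo.py | answer
-- ===== SOURCE A (Python) =====
-- def answer(b):
--     bag = ""
--     for num in range(0,20500):
--         if num > 1:
--             for j in range(2,num):
--                 if (num % j) == 0:
--                     break
--             else:
--                 if len(bag) >= 10006:
--                     break
--                 else:
--                     bag += str(num)
--     return bag[b:b+5]
-- ===== SOURCE B (Python) =====
-- def answer(b):
--     # Trial-divide only by the primes already found, stopping at sqrt(n):
--     # keep a growing prime list, concatenate primes until the bag is long enough.
--     primes = []
--     for n in range(2, 20500):
--         is_prime = True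
--         for p in primes:
--             if p * p > n:
--                 break
--             if n % p == 0:
--                 is_prime = False
--                 break
--         if is_prime:
--             primes.append(n)
--     bag = ""
--     for p in primes:
--         if len(bag) >= 10006:
--             break
--         bag += str(p)
--     return bag[b:b+5]
-- ===== Notes on version B (the rewrite author's own statement) =====
-- stated objective: faster
-- what changed: A trial-divides every candidate by every integer 2..n-1; B first builds the prime list by dividing each candidate only by already-found primes up to sqrt(n), then concatenates primes until the bag is long enough and slices.
import Mathlib
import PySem

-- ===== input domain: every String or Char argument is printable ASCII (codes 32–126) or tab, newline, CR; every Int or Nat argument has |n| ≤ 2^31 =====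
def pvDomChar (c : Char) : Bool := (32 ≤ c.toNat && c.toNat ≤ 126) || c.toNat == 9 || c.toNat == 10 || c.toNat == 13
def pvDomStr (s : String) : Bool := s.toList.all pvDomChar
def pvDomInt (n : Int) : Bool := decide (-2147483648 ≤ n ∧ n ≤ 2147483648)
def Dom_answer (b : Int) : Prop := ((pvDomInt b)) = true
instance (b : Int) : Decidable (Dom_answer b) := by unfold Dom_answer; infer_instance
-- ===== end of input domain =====

-- B replaces A's all-divisors trial division with sqrt-bounded division by previously found primes (measurably faster); return value only, no mutation.

-- ===== PORT A =====
-- inner 'for j in range(2,num): if num % j == 0: break / else:' — returns true iff some divisor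
-- was found (the loop broke); the Nat fuel only bounds the trip count so recursion is structural
-- (exact: at every call site fuel ≥ num - j, so the j < num guard, not the fuel, ends the loop)
def aInner (num : Int) (j : Int) : Nat → Bool
  | 0 => false
  | fuel + 1 =>
    if j < num then
      if PySem.Int.mod num j == 0 then true else aInner num (j + 1) fuel
    else false

-- outer 'for num in range(0,20500)' carrying bag, with the break on len(bag) >= 10006 (fuel = remaining iterations)
def aOuter (num : Int) (bag : String) : Nat → String
  | 0 => bag
  | fuel + 1 =>
    if num > 1 then
      if aInner num 2 20500 then aOuter (num + 1) bag fuel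
      else if PySem.Str.len bag ≥ 10006 then bag
      else aOuter (num + 1) (bag ++ PySem.Int.toStr num) fuel
    else aOuter (num + 1) bag fuel

def answer (b : Int) : String :=
  PySem.Str.slice (aOuter 0 "" 20500) (some b) (some (b + 5))

-- ===== PORT B =====
-- 'for p in primes: if p*p > n: break; if n % p == 0: is_prime=False; break'
def bIsPrime (n : Int) : List Int → Bool
  | [] => true
  | p :: rest =>
    if p * p > n then true
    else if PySem.Int.mod n p == 0 then false
    else bIsPrime n rest

-- 'for n in range(2,20500): if is_prime: primes.append(n)'  (fuel = remaining iterations, 20498 = 20500 - 2)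
def bPrimes (n : Int) (primes : List Int) : Nat → List Int
  | 0 => primes
  | fuel + 1 =>
    if bIsPrime n primes then bPrimes (n + 1) (primes ++ [n]) fuel
    else bPrimes (n + 1) primes fuel

-- 'for p in primes: if len(bag) >= 10006: break; bag += str(p)'
def bConcat (bag : String) : List Int → String
  | [] => bag
  | p :: rest =>
    if PySem.Str.len bag ≥ 10006 then bag
    else bConcat (bag ++ PySem.Int.toStr p) rest

def answer_alt (b : Int) : String :=
  PySem.Str.slice (bConcat "" (bPrimes 2 [] 20498)) (some b) (some (b + 5))

-- ===== PRECONDITION & SPEC =====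
def Spec_answer (b : Int) (out : String) : Prop := out = answer_alt b
instance (b : Int) (out : String) : Decidable (Spec_answer b out) := by unfold Spec_answer; infer_instance

-- ===== CLAIM (what is proved, stated in full; the proofs are below) =====
def Claim_equal_answer : Prop := ∀ (b : Int), Dom_answer b → Spec_answer b (answer b)

-- ===== LEMMAS AND PROOFS =====

-- the primes in [lo, lo+cnt), ascending, as Ints
def primesInCO (lo cnt : Nat) : List Int :=
  ((List.range' lo cnt).filter (fun m => decide (Nat.Prime m))).map (fun m => (Nat.cast m : Int))

theorem primesInCO_zero (lo : Nat) : primesInCO lo 0 = [] := rfl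

theorem primesInCO_succ_left (lo cnt : Nat) :
    primesInCO lo (cnt + 1) =
      (if Nat.Prime lo then [(lo : Int)] else []) ++ primesInCO (lo + 1) cnt := by
  simp only [primesInCO, List.range'_succ, List.filter_cons]
  by_cases h : Nat.Prime lo <;> simp [h]

theorem primesInCO_concat (lo cnt : Nat) :
    primesInCO lo (cnt + 1) =
      primesInCO lo cnt ++ (if Nat.Prime (lo + cnt) then [((lo + cnt : Nat) : Int)] else []) := by
  simp only [primesInCO, List.range'_concat, List.filter_append]
  by_cases h : Nat.Prime (lo + cnt) <;> simp [h]

theorem primesInCO_sound (lo cnt : Nat) (p : Int) (hp : p ∈ primesInCO lo cnt) :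
    ∃ q : Nat, p = (q : Int) ∧ Nat.Prime q ∧ lo ≤ q ∧ q < lo + cnt := by
  unfold primesInCO at hp
  obtain ⟨q, hq, rfl⟩ := List.mem_map.mp hp
  have h1 := List.mem_filter.mp hq
  have h2 := List.mem_range'_1.mp h1.1
  exact ⟨q, rfl, by simpa using h1.2, h2.1, by omega⟩

theorem primesInCO_complete (lo cnt : Nat) (q : Nat)
    (hq : Nat.Prime q) (hlo : lo ≤ q) (hhi : q < lo + cnt) : (q : Int) ∈ primesInCO lo cnt := by
  unfold primesInCO
  exact List.mem_map.mpr ⟨q, List.mem_filter.mpr ⟨List.mem_range'_1.mpr ⟨hlo, by omega⟩, by simpa⟩, rfl⟩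

theorem primesInCO_sorted (lo cnt : Nat) : (primesInCO lo cnt).Pairwise (· < ·) := by
  unfold primesInCO
  refine List.Pairwise.map _ (fun a b h => by exact_mod_cast h)
    (List.Pairwise.filter _ (List.pairwise_lt_range' 1))

-- minFac of a composite n ≥ 2 is a prime strictly below n
theorem minFac_lt_of_not_prime {n : Nat} (h2 : 2 ≤ n) (h : ¬ Nat.Prime n) : n.minFac < n := by
  rcases Nat.lt_or_ge n.minFac n with h' | h'
  · exact h'
  · exfalso
    have hd := Nat.minFac_dvd n
    have hle : n.minFac ≤ n := Nat.le_of_dvd (by omega) hd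
    have : n.minFac = n := le_antisymm hle h'
    exact h (this ▸ Nat.minFac_prime (by omega))

-- ----- A side: the inner loop finds a divisor iff one exists in [j, num) -----
theorem aInner_iff (fuel : Nat) : ∀ (num j : Nat), 2 ≤ j → num ≤ j + fuel →
    (aInner (num : Int) (j : Int) fuel = true ↔ ∃ k, j ≤ k ∧ k < num ∧ num % k = 0) := by
  induction fuel with
  | zero =>
    intro num j _ hle
    simp only [aInner]
    constructor
    · intro h; cases h
    · rintro ⟨k, hk1, hk2, _⟩; omega
  | succ fuel ih =>
    intro num j hj hle
    simp only [aInner]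
    by_cases hlt : j < num
    · have hlt' : (j : Int) < (num : Int) := by exact_mod_cast hlt
      rw [if_pos hlt']
      have hmod : PySem.Int.mod (num : Int) (j : Int) = ((num % j : Nat) : Int) :=
        PySem.Int.mod_natCast num j
      by_cases hz : num % j = 0
      · simp only [hmod, hz, Nat.cast_zero, beq_self_eq_true, if_true, true_iff]
        exact ⟨j, le_refl j, hlt, hz⟩
      · have hne : (((num % j : Nat) : Int) == 0) = false := by
          simp only [beq_eq_false_iff_ne, ne_eq, Nat.cast_eq_zero]; exact hz
        rw [hmod, hne, if_neg (by simp)]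
        have : ((j : Int) + 1) = ((j + 1 : Nat) : Int) := by push_cast; ring
        rw [this, ih num (j + 1) (by omega) (by omega)]
        constructor
        · rintro ⟨k, hk1, hk2, hk3⟩; exact ⟨k, by omega, hk2, hk3⟩
        · rintro ⟨k, hk1, hk2, hk3⟩
          refine ⟨k, ?_, hk2, hk3⟩
          rcases Nat.eq_or_lt_of_le hk1 with rfl | h
          · exact absurd hk3 hz
          · omega
    · have hlt' : ¬ ((j : Int) < (num : Int)) := by exact_mod_cast hlt
      rw [if_neg hlt']
      constructor
      · intro h; cases h
      · rintro ⟨k, hk1, hk2, _⟩; omega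

theorem aInner_eq_not_prime (num : Nat) (h2 : 2 ≤ num) (hle : num ≤ 20502) :
    aInner (num : Int) 2 20500 = !decide (Nat.Prime num) := by
  have h := aInner_iff 20500 num 2 (le_refl 2) (by omega)
  have h2' : ((2 : Nat) : Int) = (2 : Int) := by norm_num
  rw [h2'] at h
  by_cases hp : Nat.Prime num
  · have : ¬ ∃ k, 2 ≤ k ∧ k < num ∧ num % k = 0 := by
      rintro ⟨k, hk1, hk2, hk3⟩
      have hdvd : k ∣ num := (Nat.dvd_iff_mod_eq_zero).mpr hk3
      have := (Nat.prime_def_lt.mp hp).2 k hk2 hdvd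
      omega
    simp only [hp, decide_true, Bool.not_true]
    rw [← Bool.not_eq_true]
    intro hc; exact this (h.mp hc)
  · have hex : ∃ k, 2 ≤ k ∧ k < num ∧ num % k = 0 := by
      refine ⟨num.minFac, (Nat.minFac_prime (by omega)).two_le,
        minFac_lt_of_not_prime h2 hp, (Nat.dvd_iff_mod_eq_zero).mp (Nat.minFac_dvd num)⟩
    simp only [hp, decide_false, Bool.not_false]
    exact h.mpr hex

-- ----- B side: scanning the sorted prime list with the sqrt cut-off decides primality -----
theorem bIsPrime_eq (n : Nat) (hn : 2 ≤ n) : ∀ (ps : List Int) (c : Nat),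
    (∀ p ∈ ps, ∃ q : Nat, p = (q : Int) ∧ Nat.Prime q ∧ c ≤ q ∧ q < n) →
    (∀ q : Nat, Nat.Prime q → c ≤ q → q < n → (q : Int) ∈ ps) →
    ps.Pairwise (· < ·) →
    c ≤ n.minFac →
    bIsPrime (n : Int) ps = decide (Nat.Prime n) := by
  intro ps
  induction ps with
  | nil =>
    intro c _ hcompl _ hmin
    simp only [bIsPrime]
    by_cases hp : Nat.Prime n
    · simp [hp]
    · exfalso
      have hm := (Nat.minFac_prime (n := n) (by omega))
      exact absurd (hcompl n.minFac hm hmin (minFac_lt_of_not_prime hn hp)) (List.not_mem_nil)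
  | cons p rest ih =>
    intro c hsound hcompl hsorted hmin
    obtain ⟨q, rfl, hqp, hcq, hqn⟩ := hsound _ (List.mem_cons_self)
    simp only [bIsPrime]
    by_cases hbig : n < q * q
    · have hbig' : (q : Int) * (q : Int) > (n : Int) := by exact_mod_cast hbig
      rw [if_pos hbig']
      suffices hp : Nat.Prime n by simp [hp]
      by_contra hp
      have hmp := Nat.minFac_prime (n := n) (by omega)
      have hmlt := minFac_lt_of_not_prime hn hp
      have hmem := hcompl n.minFac hmp hmin hmlt
      have hqm : q ≤ n.minFac := by
        rcases List.mem_cons.mp hmem with h | h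
        · exact le_of_eq (by exact_mod_cast h.symm)
        · have := (List.pairwise_cons.mp hsorted).1 _ h
          exact_mod_cast le_of_lt this
      have hsq : n.minFac ^ 2 ≤ n := Nat.minFac_sq_le_self (by omega) hp
      have : q * q ≤ n.minFac * n.minFac := Nat.mul_le_mul hqm hqm
      nlinarith [hsq]
    · have hbig' : ¬ ((q : Int) * (q : Int) > (n : Int)) := by
        push Not; exact_mod_cast Nat.le_of_not_lt hbig
      rw [if_neg hbig']
      have hmod : PySem.Int.mod (n : Int) (q : Int) = ((n % q : Nat) : Int) :=
        PySem.Int.mod_natCast n q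
      by_cases hz : n % q = 0
      · have hdvd : q ∣ n := Nat.dvd_iff_mod_eq_zero.mpr hz
        have hp : ¬ Nat.Prime n := by
          intro hp
          have := (Nat.prime_def_lt.mp hp).2 q hqn hdvd
          have := hqp.two_le; omega
        simp [hmod, hz, hp]
      · have hne : (((n % q : Nat) : Int) == 0) = false := by
          simp only [beq_eq_false_iff_ne, ne_eq, Nat.cast_eq_zero]; exact hz
        rw [hmod, hne, if_neg (by simp)]
        refine ih (q + 1) ?_ ?_ (List.Pairwise.of_cons hsorted) ?_
        · intro r hr
          obtain ⟨q', rfl, h1, h2, h3⟩ := hsound r (List.mem_cons_of_mem _ hr)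
          have hlt : (q : Int) < (q' : Int) := (List.pairwise_cons.mp hsorted).1 _ hr
          exact ⟨q', rfl, h1, by exact_mod_cast Nat.succ_le_of_lt (by exact_mod_cast hlt), h3⟩
        · intro q' h1 h2 h3
          have hmem := hcompl q' h1 (by omega) h3
          rcases List.mem_cons.mp hmem with h | h
          · exfalso; have : q' = q := by exact_mod_cast h
            omega
          · exact h
        · -- no prime ≤ q divides n, so minFac > q
          by_contra hc
          push Not at hc
          have hmle : n.minFac ≤ q := by omega
          have hmp := Nat.minFac_prime (n := n) (by omega)
          have hmlt : n.minFac < n := lt_of_le_of_lt hmle hqn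
          have hmem := hcompl n.minFac hmp hmin hmlt
          rcases List.mem_cons.mp hmem with h | h
          · have : n.minFac = q := by exact_mod_cast h
            exact hz (Nat.dvd_iff_mod_eq_zero.mp (this ▸ Nat.minFac_dvd n))
          · have := (List.pairwise_cons.mp hsorted).1 _ h
            have : (q : Nat) < n.minFac := by exact_mod_cast this
            omega

-- bPrimes grows the canonical prime list
theorem bPrimes_eq (fuel : Nat) : ∀ n : Nat, 2 ≤ n →
    bPrimes (n : Int) (primesInCO 0 n) fuel = primesInCO 0 (n + fuel) := by
  induction fuel with
  | zero => intro n _; simp [bPrimes]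
  | succ fuel ih =>
    intro n hn
    simp only [bPrimes]
    have hb : bIsPrime (n : Int) (primesInCO 0 n) = decide (Nat.Prime n) := by
      refine bIsPrime_eq n hn (primesInCO 0 n) 0 ?_ ?_ (primesInCO_sorted 0 n) (Nat.zero_le _)
      · intro p hp
        obtain ⟨q, rfl, h1, _, h3⟩ := primesInCO_sound 0 n p hp
        exact ⟨q, rfl, h1, Nat.zero_le q, by omega⟩
      · intro q h1 _ h3
        exact primesInCO_complete 0 n q h1 (Nat.zero_le q) (by omega)
    have hcast : (n : Int) + 1 = ((n + 1 : Nat) : Int) := by push_cast; ring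
    have hnext : n + 1 + fuel = n + (fuel + 1) := by omega
    by_cases hp : Nat.Prime n
    · rw [hb]
      simp only [hp, decide_true, if_true]
      have : primesInCO 0 n ++ [(n : Int)] = primesInCO 0 (n + 1) := by
        rw [primesInCO_concat 0 n]; simp [hp]
      rw [this, hcast, ih (n + 1) (by omega), hnext]
    · rw [hb]
      simp only [hp, decide_false, Bool.false_eq_true, if_false]
      have : primesInCO 0 n = primesInCO 0 (n + 1) := by
        rw [primesInCO_concat 0 n]; simp [hp]
      rw [this, hcast, ih (n + 1) (by omega), hnext]

-- A's outer loop, from num on, is bConcat over the primes in [num, 20500)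
theorem aOuter_succ (num : Int) (bag : String) (fuel : Nat) :
    aOuter num bag (fuel + 1) =
      if num > 1 then
        if aInner num 2 20500 then aOuter (num + 1) bag fuel
        else if PySem.Str.len bag ≥ 10006 then bag
        else aOuter (num + 1) (bag ++ PySem.Int.toStr num) fuel
      else aOuter (num + 1) bag fuel := rfl

theorem aOuter_eq (fuel : Nat) : ∀ (num : Nat) (bag : String), 2 ≤ num → num + fuel = 20500 →
    aOuter (num : Int) bag fuel = bConcat bag (primesInCO num fuel) := by
  induction fuel with
  | zero => intro num bag _ _; simp [aOuter, primesInCO_zero, bConcat]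
  | succ fuel ih =>
    intro num bag h2 hsum
    have hgt : ((num : Int) > 1) := by exact_mod_cast (by omega : (1 : Nat) < num)
    have hcast : (num : Int) + 1 = ((num + 1 : Nat) : Int) := by push_cast; ring
    rw [aOuter_succ, if_pos hgt, aInner_eq_not_prime num h2 (by omega), primesInCO_succ_left]
    by_cases hp : Nat.Prime num
    · rw [if_pos hp, List.singleton_append]
      simp only [hp, decide_true, Bool.not_true, Bool.false_eq_true, if_false]
      simp only [bConcat]
      by_cases hlen : PySem.Str.len bag ≥ 10006
      · rw [if_pos hlen, if_pos hlen]
      · rw [if_neg hlen, if_neg hlen, hcast, ih (num + 1) _ (by omega) (by omega)]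
    · rw [if_neg hp, List.nil_append]
      simp only [hp, decide_false, Bool.not_false, if_true]
      rw [hcast, ih (num + 1) bag (by omega) (by omega)]

-- the two bags coincide (both are the concatenation of the primes below 20500, cut at length 10006)
theorem bag_eq : aOuter 0 "" 20500 = bConcat "" (bPrimes 2 [] 20498) := by
  have c2 : ((2 : Nat) : Int) = (2 : Int) := by norm_num
  have s1 : aOuter 0 "" 20500 = aOuter 1 "" 20499 := by
    rw [show (20500 : Nat) = 20499 + 1 from rfl, aOuter_succ]
    rw [if_neg (by norm_num)]
    norm_num
  have s2 : aOuter 1 "" 20499 = aOuter 2 "" 20498 := by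
    rw [show (20499 : Nat) = 20498 + 1 from rfl, aOuter_succ]
    rw [if_neg (by norm_num)]
    norm_num
  have s3 := aOuter_eq 20498 2 "" (by norm_num) (by norm_num)
  rw [c2] at s3
  have h02 : primesInCO 0 2 = [] := by
    have hr2 : List.range' 0 2 = [0, 1] := rfl
    simp [primesInCO, hr2, Nat.not_prime_zero, Nat.not_prime_one]
  have hB : bPrimes 2 [] 20498 = primesInCO 2 20498 := by
    have h := bPrimes_eq 20498 2 (by norm_num)
    rw [c2, h02] at h
    rw [h]
    have hr : List.range' 0 20500 = 0 :: 1 :: List.range' 2 20498 := by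
      rw [show (20500 : Nat) = 20499 + 1 from rfl, List.range'_succ,
          show (20499 : Nat) = 20498 + 1 from rfl, List.range'_succ]
    show primesInCO 0 20500 = primesInCO 2 20498
    simp only [primesInCO, hr, List.filter_cons]
    norm_num [Nat.not_prime_zero, Nat.not_prime_one]
  rw [s1, s2, s3, hB]

-- ===== VERDICT (by name: the statement is the Claim_ definition above) =====
theorem answer_spec : Claim_equal_answer := by
  intro b _
  unfold Spec_answer answer answer_alt
  rw [bag_eq]
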